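-- pv_equiv track=rewrite | github.com/tomgxz/PokerAnalyser | main.py | fourKindScore
-- ===== SOURCE A (Python) =====
-- def fourKindScore(cards):
--     returnList=[]
--     start=cards[0]
--     added=True
--     for card in cards[1:]:
--         if card[0] == start[0] and added:
--             returnList.insert(0,card[0])
--             added=False
--         elif card[0] != start[0] and not added:
--             returnList.append(card[0])
--     if len(returnList) < 1:
--         returnList.append(start[0])
--         start=cards[-1]
--         for card in cards[:-1]:
--             if card[0] == start[0]:
--                 returnList.insert(0,card[0])
--                 break
--     return returnList
-- ===== SOURCE B (Python) =====
-- def fourKindScore(cards):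
--     r0 = cards[0][0]
--     rev = []          # kicker ranks collected back-to-front
--     cut = None        # len(rev) at the latest-seen match = earliest match in forward order
--     for c in reversed(cards[1:]):
--         if c[0] == r0:
--             cut = len(rev)
--         else:
--             rev.append(c[0])
--     if cut is not None:
--         return [r0] + rev[:cut][::-1]
--     last = cards[-1][0]
--     return [last, r0] if any(c[0] == last for c in cards[:-1]) else [r0]
-- ===== Notes on version B (the rewrite author's own statement) =====
-- stated objective: alternative
-- what changed: Replaced A's forward flag-driven accumulating pass (insert-at-front on the first match, then append differing ranks) by a single back-to-front traversal that collects kicker ranks and records a cut index at each match, slicing the result at the end; the fallback's break-loop becomes a membership test.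
import Mathlib
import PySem

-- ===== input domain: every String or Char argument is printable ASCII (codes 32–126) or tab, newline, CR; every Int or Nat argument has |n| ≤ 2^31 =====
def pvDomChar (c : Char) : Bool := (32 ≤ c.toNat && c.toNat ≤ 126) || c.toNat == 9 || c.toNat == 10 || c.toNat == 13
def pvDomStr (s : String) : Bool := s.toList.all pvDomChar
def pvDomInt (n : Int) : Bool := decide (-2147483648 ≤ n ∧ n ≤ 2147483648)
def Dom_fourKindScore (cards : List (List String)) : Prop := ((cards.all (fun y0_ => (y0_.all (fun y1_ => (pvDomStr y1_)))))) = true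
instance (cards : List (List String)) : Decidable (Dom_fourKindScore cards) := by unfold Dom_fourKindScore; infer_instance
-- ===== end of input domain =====

-- B replaces A's forward flag-driven accumulating pass by a single back-to-front pass
-- with a cut index, plus a membership test in the fallback (alternative decomposition, same cost).


-- ===== PORT A =====
-- card[0]; total form, exact under Pre_ (every card nonempty)
def pvHd (c : List String) : String := (PySem.List.pyGet? c 0).getD ""

-- one iteration of A's main loop over state (returnList, added)
def pvStepA (r : String) (st : List String × Bool) (card : List String) : List String × Bool :=
  if pvHd card = r ∧ st.2 = true then (pvHd card :: st.1, false)
  else if pvHd card ≠ r ∧ st.2 = false then (st.1 ++ [pvHd card], st.2)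
  else st

-- A's fallback 'for … if …: insert(0,·); break' loop
def pvBreakLoopA (r : String) : List (List String) → List String → List String
  | [], acc => acc
  | c :: t, acc => if pvHd c = r then pvHd c :: acc else pvBreakLoopA r t acc

def fourKindScore (cards : List (List String)) : List String :=
  let start := (PySem.List.pyGet? cards 0).getD []
  let st := (PySem.List.slice cards (some 1) none).foldl (pvStepA (pvHd start)) ([], true)
  if st.1.length < 1 then
    let returnList := st.1 ++ [pvHd start]
    let start2 := (PySem.List.pyGet? cards (-1)).getD []
    pvBreakLoopA (pvHd start2) (PySem.List.slice cards none (some (-1))) returnList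
  else st.1

-- ===== PORT B =====
-- one iteration of B's reversed loop over state (rev, cut)
def pvStepB (r : String) (st : List String × Option Nat) (card : List String) : List String × Option Nat :=
  if pvHd card = r then (st.1, some st.1.length) else (st.1 ++ [pvHd card], st.2)

def fourKindScore_alt (cards : List (List String)) : List String :=
  let r0 := pvHd ((PySem.List.pyGet? cards 0).getD [])
  let st := (PySem.List.slice cards (some 1) none).reverse.foldl (pvStepB r0) ([], none)
  match st.2 with
  | some cut => r0 :: (st.1.take cut).reverse   -- rev[:cut][::-1]; cut = len(rev) at record time, so take is exact
  | none =>
      let last := pvHd ((PySem.List.pyGet? cards (-1)).getD [])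
      if (PySem.List.slice cards none (some (-1))).any (fun c => pvHd c == last) then [last, r0]
      else [r0]

-- ===== PRECONDITION & SPEC =====
-- Pre_ excludes exactly the inputs where Python A raises IndexError: empty cards, or any empty card.
def Pre_fourKindScore (cards : List (List String)) : Prop :=
  cards ≠ [] ∧ ∀ c ∈ cards, c ≠ []
instance (cards : List (List String)) : Decidable (Pre_fourKindScore cards) := by
  unfold Pre_fourKindScore; infer_instance
def pvWitness_fourKindScore : List (List String) :=
  [["7", "h"], ["2", "s"], ["7", "d"], ["7", "c"], ["7", "s"], ["5", "d"]]

def Spec_fourKindScore (cards : List (List String)) (out : List String) : Prop := out = fourKindScore_alt cards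
instance (cards : List (List String)) (out : List String) : Decidable (Spec_fourKindScore cards out) := by unfold Spec_fourKindScore; infer_instance

-- ===== CLAIM (what is proved, stated in full; the proofs are below) =====
def Claim_equal_fourKindScore : Prop := ∀ (cards : List (List String)), Dom_fourKindScore cards → Pre_fourKindScore cards → Spec_fourKindScore cards (fourKindScore cards)

-- ===== LEMMAS AND PROOFS =====

-- after the flag has been lowered, A's loop just appends the differing ranks
theorem pvFoldA_after (r : String) (t : List (List String)) (acc : List String) :
    t.foldl (pvStepA r) (acc, false)
      = (acc ++ (t.filter (fun c => pvHd c != r)).map pvHd, false) := by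
  induction t generalizing acc with
  | nil => simp [List.foldl]
  | cons c t ih =>
    by_cases h : pvHd c = r
    · simp [List.foldl, pvStepA, h, ih]
    · simp [List.foldl, pvStepA, h, ih]

-- characterisation of A's main loop via the pivot index
theorem pvFoldA_char (r : String) (l : List (List String)) :
    l.foldl (pvStepA r) ([], true)
      = match l.findIdx? (fun c => pvHd c == r) with
        | some i => (r :: ((l.drop (i + 1)).filter (fun c => pvHd c != r)).map pvHd, false)
        | none => ([], true) := by
  induction l with
  | nil => simp
  | cons c l ih =>
    by_cases h : pvHd c = r
    · simp [List.foldl, pvStepA, h, List.findIdx?_cons, pvFoldA_after]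
    · rw [List.foldl_cons, show pvStepA r ([], true) c = ([], true) by simp [pvStepA, h],
          ih, List.findIdx?_cons]
      have hb : (pvHd c == r) = false := by simp [h]
      rw [hb]
      cases hf : l.findIdx? (fun c => pvHd c == r) with
      | none => simp
      | some i => simp

-- A's fallback break-loop is a find?
theorem pvBreakLoopA_char (r : String) (t : List (List String)) (acc : List String) :
    pvBreakLoopA r t acc
      = match t.find? (fun c => pvHd c == r) with
        | some c => pvHd c :: acc
        | none => acc := by
  induction t with
  | nil => simp [pvBreakLoopA]
  | cons c t ih =>
    by_cases h : pvHd c = r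
    · simp [pvBreakLoopA, h, List.find?]
    · have hb : (pvHd c == r) = false := by simp [h]
      simp [pvBreakLoopA, h, List.find?, hb, ih]

-- characterisation of B's reversed loop: rev = all kickers back-to-front,
-- cut = number of kickers strictly after the first (forward) match
theorem pvFoldB_char (r : String) (l : List (List String)) :
    l.reverse.foldl (pvStepB r) ([], none)
      = ( ((l.filter (fun c => pvHd c != r)).map pvHd).reverse,
          (l.findIdx? (fun c => pvHd c == r)).map
            (fun i => (((l.drop (i + 1)).filter (fun c => pvHd c != r)).map pvHd).length) ) := by
  induction l with
  | nil => simp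
  | cons c l ih =>
    rw [List.reverse_cons, List.foldl_append, ih, List.findIdx?_cons]
    by_cases h : pvHd c = r
    · simp [pvStepB, h]
    · have hb : (pvHd c == r) = false := by simp [h]
      rw [hb]
      cases hf : l.findIdx? (fun c => pvHd c == r) with
      | none => simp [pvStepB, h]
      | some i => simp [pvStepB, h]

-- taking a suffix's length from the reverse and reversing back yields the suffix
theorem pvTakeRevSuffix {α : Type} (a b : List α) :
    (((a ++ b).reverse.take b.length).reverse) = b := by
  rw [List.reverse_append, ← List.length_reverse (as := b), List.take_left, List.reverse_reverse]

-- ===== VERDICT (by name: the statement is the Claim_ definition above) =====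
theorem fourKindScore_spec : Claim_equal_fourKindScore := by
  intro cards _ _
  unfold Spec_fourKindScore fourKindScore fourKindScore_alt
  simp only [PySem.List.slice_from_one, PySem.List.slice_to_neg_one]
  rw [show cards.tail = List.drop 1 cards by simp [List.drop_one], pvFoldA_char, pvFoldB_char]
  set r := pvHd ((PySem.List.pyGet? cards 0).getD []) with hr
  cases hf : (cards.drop 1).findIdx? (fun c => pvHd c == r) with
  | some i =>
    simp only [Option.map_some]
    have hsplit : cards.drop 1 = (cards.drop 1).take (i + 1) ++ (cards.drop 1).drop (i + 1) :=
      (List.take_append_drop _ _).symm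
    have : ((cards.drop 1).filter (fun c => pvHd c != r)).map pvHd
        = (((cards.drop 1).take (i + 1)).filter (fun c => pvHd c != r)).map pvHd
          ++ (((cards.drop 1).drop (i + 1)).filter (fun c => pvHd c != r)).map pvHd := by
      conv_lhs => rw [hsplit]
      simp [List.filter_append]
    rw [this, pvTakeRevSuffix]
    simp
  | none =>
    simp only [Option.map_none, List.length_nil, pvBreakLoopA_char]
    set last := pvHd ((PySem.List.pyGet? cards (-1)).getD []) with hlast
    cases hfind : cards.dropLast.find? (fun c => pvHd c == last) with
    | none =>
      have hany : cards.dropLast.any (fun c => pvHd c == last) = false := by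
        rw [List.any_eq_false]
        intro x hx
        simpa using List.find?_eq_none.mp hfind x hx
      simp [hany]
    | some c =>
      have hc : pvHd c = last := by simpa using List.find?_some hfind
      have hany : cards.dropLast.any (fun c => pvHd c == last) = true :=
        List.any_eq_true.mpr ⟨c, List.mem_of_find?_eq_some hfind, by simp [hc]⟩
      simp [hc, hany]
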